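-- pv_equiv track=rewrite | github.com/yt-dlp/yt-dlp | api/common.py | _looks_like_network_or_proxy_error
-- ===== SOURCE A (Python) =====
-- def _looks_like_network_or_proxy_error(error_message):
--     message = (error_message or '').lower()
--     network_signals = (
--         'proxyerror',
--         'tunnel connection failed',
--         'network is unreachable',
--         'name or service not known',
--         'temporary failure in name resolution',
--         'timed out',
--         'connection reset',
--     )
--     return any(signal in message for signal in network_signals)
-- ===== SOURCE B (Python) =====
-- def _looks_like_network_or_proxy_error(error_message):
--     message = (error_message or '').lower()
--     signals = (
--         'proxyerror',
--         'tunnel connection failed',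
--         'network is unreachable',
--         'name or service not known',
--         'temporary failure in name resolution',
--         'timed out',
--         'connection reset',
--     )
--     # single left-to-right scan: at each position, does some signal start here?
--     for i in range(len(message) + 1):
--         if any(message.startswith(s, i) for s in signals):
--             return True
--     return False
-- ===== Notes on version B (the rewrite author's own statement) =====
-- stated objective: alternative
-- what changed: Replaces the signal-major loop (one full substring search per signal) by a single position-major scan of the message that at each position tests whether any signal starts there.
import Mathlib
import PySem

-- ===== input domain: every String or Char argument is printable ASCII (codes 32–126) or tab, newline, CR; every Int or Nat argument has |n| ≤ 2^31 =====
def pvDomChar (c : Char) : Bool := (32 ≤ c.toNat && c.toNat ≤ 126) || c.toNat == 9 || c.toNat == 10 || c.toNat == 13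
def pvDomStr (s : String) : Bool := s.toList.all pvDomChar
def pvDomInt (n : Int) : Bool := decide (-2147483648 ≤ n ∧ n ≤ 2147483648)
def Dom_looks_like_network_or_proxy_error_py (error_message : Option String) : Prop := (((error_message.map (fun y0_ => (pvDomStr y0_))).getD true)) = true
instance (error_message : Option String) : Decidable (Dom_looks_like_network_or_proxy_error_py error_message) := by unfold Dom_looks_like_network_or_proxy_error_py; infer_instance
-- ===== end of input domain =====

-- B replaces A's per-signal substring-membership loop by a single position-major scan of the message; objective: alternative structure, same cost class.


-- the fixed signal tuple, shared verbatim by both Pythons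
def pvNetworkSignals : List String :=
  [ "proxyerror",
    "tunnel connection failed",
    "network is unreachable",
    "name or service not known",
    "temporary failure in name resolution",
    "timed out",
    "connection reset" ]

-- ===== PORT A =====
def looks_like_network_or_proxy_error_py (error_message : Option String) : Bool :=
  let message := PySem.Str.lower (error_message.getD "")
  pvNetworkSignals.any (fun signal => PySem.Str.isIn signal message)

-- ===== PORT B =====
-- B's scan: for each position (suffix) of the message, does some signal start here?
def pvScanSignals (signals : List (List Char)) : List Char → Bool
  | [] => signals.any (fun s => s.isPrefixOf ([] : List Char))
  | c :: rest => signals.any (fun s => s.isPrefixOf (c :: rest)) || pvScanSignals signals rest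

def looks_like_network_or_proxy_error_py_alt (error_message : Option String) : Bool :=
  let message := (PySem.Str.lower (error_message.getD "")).toList
  pvScanSignals (pvNetworkSignals.map String.toList) message

-- ===== PRECONDITION & SPEC =====
def Spec_looks_like_network_or_proxy_error_py (error_message : Option String) (out : Bool) : Prop := out = looks_like_network_or_proxy_error_py_alt error_message
instance (error_message : Option String) (out : Bool) : Decidable (Spec_looks_like_network_or_proxy_error_py error_message out) := by unfold Spec_looks_like_network_or_proxy_error_py; infer_instance

-- ===== CLAIM (what is proved, stated in full; the proofs are below) =====
def Claim_equal_looks_like_network_or_proxy_error_py : Prop := ∀ (error_message : Option String), Dom_looks_like_network_or_proxy_error_py error_message → Spec_looks_like_network_or_proxy_error_py error_message (looks_like_network_or_proxy_error_py error_message)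

-- ===== LEMMAS AND PROOFS =====

-- the position-major scan decides "some signal is an infix"
theorem pvScanSignals_eq_any_infix (signals : List (List Char)) (l : List Char) :
    pvScanSignals signals l = signals.any (fun s => decide (s <:+: l)) := by
  induction l with
  | nil =>
      simp only [pvScanSignals]
      apply Bool.eq_iff_iff.mpr
      simp [List.any_eq_true, List.prefix_iff_eq_take]
  | cons c rest ih =>
      simp only [pvScanSignals, ih]
      apply Bool.eq_iff_iff.mpr
      simp only [Bool.or_eq_true, List.any_eq_true, decide_eq_true_eq,
        List.isPrefixOf_iff_prefix, List.infix_cons_iff]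
      constructor
      · rintro (⟨s, hs, h⟩ | ⟨s, hs, h⟩) <;> exact ⟨s, hs, by tauto⟩
      · rintro ⟨s, hs, h | h⟩
        · exact Or.inl ⟨s, hs, h⟩
        · exact Or.inr ⟨s, hs, h⟩

-- ===== VERDICT (by name: the statement is the Claim_ definition above) =====
theorem looks_like_network_or_proxy_error_py_spec : Claim_equal_looks_like_network_or_proxy_error_py := by
  intro error_message _
  unfold Spec_looks_like_network_or_proxy_error_py
  unfold looks_like_network_or_proxy_error_py looks_like_network_or_proxy_error_py_alt
  rw [pvScanSignals_eq_any_infix, List.any_map]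
  apply List.any_congr rfl
  intro s
  apply Bool.eq_iff_iff.mpr
  simp [PySem.Str.isIn_eq, PySem.Chars.isIn_iff_infix]
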